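-- pv_equiv track=rewrite | github.com/Musadalancikar/Codeforces-Python | 1607A-LinearKeyboard.py | linear_keybord
-- ===== SOURCE A (Python) =====
-- def linear_keybord(n, string):
--     total = 0
--     if len(string) <= 1:
--         return 0
--     else:
--         start = n.index(string[0])+1
--         for j in range(len(string)-1):
--             end = n.index(string[j+1])+1
--             total += abs(end - start)
--             start = end
--         return total
-- ===== SOURCE B (Python) =====
-- def linear_keybord(n, string):
--     if len(string) <= 1:
--         return 0
--     ps = [n.index(c) for c in string]
--     # difference array over the gaps between adjacent keys: a move from a to b
--     # crosses exactly the gaps k with min(a,b) <= k < max(a,b)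
--     delta = [0] * (len(n) + 1)
--     for a, b in zip(ps, ps[1:]):
--         delta[min(a, b)] += 1
--         delta[max(a, b)] -= 1
--     total = 0
--     cover = 0
--     for k in range(len(n) - 1):
--         cover += delta[k]      # cover = number of moves crossing gap k
--         total += cover
--     return total
-- ===== Notes on version B (the rewrite author's own statement) =====
-- stated objective: alternative
-- what changed: Instead of summing position distances of consecutive characters along the string, B builds a difference array over the keyboard's adjacent-key gaps (+1 at min position, -1 at max position per consecutive pair) and prefix-sums it, summing for each gap how many moves cross it; correct because |p2-p1| equals the number of gaps between the two positions.
import Mathlib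
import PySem

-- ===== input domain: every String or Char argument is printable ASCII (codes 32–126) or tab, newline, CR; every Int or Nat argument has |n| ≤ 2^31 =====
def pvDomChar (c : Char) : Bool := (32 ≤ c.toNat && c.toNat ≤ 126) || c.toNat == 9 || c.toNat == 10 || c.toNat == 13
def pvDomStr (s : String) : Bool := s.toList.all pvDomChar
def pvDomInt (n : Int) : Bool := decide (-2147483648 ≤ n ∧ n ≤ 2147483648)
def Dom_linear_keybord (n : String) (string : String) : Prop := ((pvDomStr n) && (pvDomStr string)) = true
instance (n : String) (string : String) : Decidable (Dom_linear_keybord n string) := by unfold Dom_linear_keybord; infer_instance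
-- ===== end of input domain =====

-- B replaces A's walk along the string (summing position distances of consecutive chars)
-- by a difference array over the keyboard's adjacent-key gaps, prefix-summed so that each
-- gap contributes the number of moves crossing it; objective: alternative algorithm.

-- ===== PORT A =====
-- n.index(c) for a 1-char needle = position of the char in n; .getD 0 is reached only
-- where Python raises ValueError (excluded by Pre_).
def linear_keybord (n : String) (string : String) : Int :=
  let cs := string.toList
  if cs.length ≤ 1 then 0
  else
    let start0 : Int := ((PySem.List.index? n.toList (PySem.List.pyGetD cs 0 ' ')).getD 0 : Nat) + 1
    (((PySem.List.pyRange 0 ((cs.length : Int) - 1) 1).foldl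
        (fun (st : Int × Int) j =>
          let e : Int := ((PySem.List.index? n.toList (PySem.List.pyGetD cs (j + 1) ' ')).getD 0 : Nat) + 1
          (st.1 + |e - st.2|, e)) ((0 : Int), start0))).1

-- ===== PORT B =====
def linear_keybord_alt (n : String) (string : String) : Int :=
  if string.toList.length ≤ 1 then 0
  else
    let ps : List Int := string.toList.map (fun c => (((PySem.List.index? n.toList c).getD 0 : Nat) : Int))
    let delta : List Int :=
      (ps.zip (ps.drop 1)).foldl
        (fun d p =>
          let d1 := PySem.List.pySetD d (min p.1 p.2) (PySem.List.pyGetD d (min p.1 p.2) 0 + 1)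
          PySem.List.pySetD d1 (max p.1 p.2) (PySem.List.pyGetD d1 (max p.1 p.2) 0 - 1))
        (PySem.List.pyRepeat [0] ((n.toList.length : Int) + 1))
    ((PySem.List.pyRange 0 ((n.toList.length : Int) - 1) 1).foldl
        (fun (tc : Int × Int) k =>
          let cover := tc.2 + PySem.List.pyGetD delta k 0
          (tc.1 + cover, cover))
        ((0 : Int), (0 : Int))).1

-- ===== PRECONDITION & SPEC =====
-- Pre_ excludes exactly the inputs where Python A raises ValueError (len(string) ≥ 2 and
-- some character of string absent from the keyboard n); B raises there too.
def Pre_linear_keybord (n : String) (string : String) : Prop :=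
  string.toList.length ≤ 1 ∨ (string.toList.all (fun c => n.toList.contains c)) = true
instance (n : String) (string : String) : Decidable (Pre_linear_keybord n string) := by
  unfold Pre_linear_keybord; infer_instance

def pvWitness_linear_keybord : String × String := ("abcdef", "fade")

def Spec_linear_keybord (n : String) (string : String) (out : Int) : Prop := out = linear_keybord_alt n string
instance (n : String) (string : String) (out : Int) : Decidable (Spec_linear_keybord n string out) := by unfold Spec_linear_keybord; infer_instance

-- ===== CLAIM (what is proved, stated in full; the proofs are below) =====
def Claim_equal_linear_keybord : Prop := ∀ (n : String) (string : String), Dom_linear_keybord n string → Pre_linear_keybord n string → Spec_linear_keybord n string (linear_keybord n string)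

-- ===== LEMMAS AND PROOFS =====

-- ---- A = sum of |pos differences| over consecutive pairs ----

-- distance-chain: pdist s [x1, x2, ...] = |x1 - s| + |x2 - x1| + ...
def pdist : Int → List Int → Int
  | _, [] => 0
  | s, x :: xs => |x - s| + pdist x xs

theorem pdist_shift (xs : List Int) (s : Int) :
    pdist (s + 1) (xs.map (· + 1)) = pdist s xs := by
  induction xs generalizing s with
  | nil => rfl
  | cons x xs ih =>
    simp only [List.map_cons, pdist, ih, show x + 1 - (s + 1) = x - s from by ring]

theorem zip_sum_eq_pdist (p : Int) (ps : List Int) :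
    (((p :: ps).zip ps).map (fun q => |q.2 - q.1|)).sum = pdist p ps := by
  induction ps generalizing p with
  | nil => simp [pdist]
  | cons x xs ih =>
    simp only [List.zip_cons_cons, List.map_cons, List.sum_cons, pdist, ih]

theorem pyGetD_cons_succ {α : Type} (x : α) (xs : List α) (j : Int) (d : α) (hj : 0 ≤ j) :
    PySem.List.pyGetD (x :: xs) (j + 1) d = PySem.List.pyGetD xs j d := by
  obtain ⟨k, rfl⟩ := Int.eq_ofNat_of_zero_le hj
  have h1 : ((k : Int) + 1) = ((k + 1 : Nat) : Int) := by push_cast; ring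
  rw [h1, PySem.List.pyGetD_natCast, PySem.List.pyGetD_natCast]
  simp

theorem loop_eq_pdist (tl : List Char) (F : Char → Int) (s t : Int) :
    ((tl.foldl (fun (st : Int × Int) c => (st.1 + |F c - st.2|, F c)) (t, s))).1
      = t + pdist s (tl.map F) := by
  induction tl generalizing s t with
  | nil => simp [pdist]
  | cons c tl ih => simp [List.foldl, ih, pdist]; ring

-- the non-degenerate case of A (length ≥ 2), stated over the decomposed char list
theorem else_branch (n : String) (c0 : Char) (tl : List Char) :
    (((PySem.List.pyRange 0 (((c0 :: tl).length : Int) - 1) 1).foldl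
        (fun (st : Int × Int) j =>
          let e : Int := ((PySem.List.index? n.toList (PySem.List.pyGetD (c0 :: tl) (j + 1) ' ')).getD 0 : Nat) + 1
          (st.1 + |e - st.2|, e))
        ((0 : Int), ((PySem.List.index? n.toList (PySem.List.pyGetD (c0 :: tl) 0 ' ')).getD 0 : Nat) + 1))).1
      = ((((c0 :: tl).map (fun c => (((PySem.List.index? n.toList c).getD 0 : Nat) : Int))).zip
          (((c0 :: tl).map (fun c => (((PySem.List.index? n.toList c).getD 0 : Nat) : Int))).drop 1)).map
          (fun p => |p.2 - p.1|)).sum := by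
  set f : Char → Int := fun c => (((PySem.List.index? n.toList c).getD 0 : Nat) : Int) with hf
  have hb : (((c0 :: tl).length : Int) - 1) = (tl.length : Int) := by
    simp [List.length_cons]
  have hbody :
      (PySem.List.pyRange 0 ((tl.length : Int)) 1).foldl
        (fun (st : Int × Int) j =>
          let e : Int := ((PySem.List.index? n.toList (PySem.List.pyGetD (c0 :: tl) (j + 1) ' ')).getD 0 : Nat) + 1
          (st.1 + |e - st.2|, e)) ((0 : Int), f c0 + 1)
      = (PySem.List.pyRange 0 ((tl.length : Int)) 1).foldl
        (fun (st : Int × Int) j =>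
          (st.1 + |(f (PySem.List.pyGetD tl j ' ') + 1) - st.2|, f (PySem.List.pyGetD tl j ' ') + 1))
        ((0 : Int), f c0 + 1) := by
    refine PySem.List.foldl_congr_mem _ _ _ _ ?_
    intro st j hj
    have h0 : 0 ≤ j := (PySem.List.mem_pyRange_one.mp hj).1
    simp [pyGetD_cons_succ c0 tl j ' ' h0, hf]
  rw [hb]
  simp only [PySem.List.pyGetD_zero_cons]
  rw [hbody]
  rw [PySem.List.foldl_pyRange_zero_pyGetD' tl ' '
        (fun (st : Int × Int) c => (st.1 + |(f c + 1) - st.2|, f c + 1)) ((0 : Int), f c0 + 1)]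
  rw [loop_eq_pdist tl (fun c => f c + 1) (f c0 + 1) 0]
  have hm : tl.map (fun c => f c + 1) = (tl.map f).map (· + 1) := by
    simp [List.map_map]
  rw [hm, pdist_shift, zero_add]
  simp [zip_sum_eq_pdist (f c0) (tl.map f)]

-- ---- B = the same sum, via the difference array over keyboard gaps ----

-- swap a double list sum
theorem sum_sum_comm {α β : Type} (xs : List α) (ys : List β) (f : α → β → Int) :
    (xs.map (fun x => ((ys.map (f x)).sum))).sum
      = (ys.map (fun y => ((xs.map (fun x => f x y)).sum))).sum := by
  induction xs with
  | nil => simp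
  | cons x xs ih =>
    simp [ih, List.sum_map_add]

-- closed form for the 0/1 crossing-indicator sum over List.range
theorem range_ind_sum (m : Nat) (lo hi : Int) (h0 : 0 ≤ lo) (hlh : lo ≤ hi) :
    ((List.range m).map
        (fun (k : Nat) => if lo ≤ (k : Int) ∧ (k : Int) < hi then (1 : Int) else 0)).sum
      = min hi (m : Int) - min lo (m : Int) := by
  induction m with
  | zero => simp; omega
  | succ m ih =>
    rw [List.range_succ, List.map_append, List.sum_append, ih]
    simp only [List.map_cons, List.map_nil, List.sum_cons, List.sum_nil]
    push_cast
    split_ifs with h <;> omega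

-- per pair: the number of crossed gaps is the absolute position difference
theorem gap_count_eq_abs (L : Nat) (a b : Int)
    (ha1 : 0 ≤ a) (ha2 : a ≤ (L : Int) - 1) (hb1 : 0 ≤ b) (hb2 : b ≤ (L : Int) - 1) :
    ((List.range ((L : Int) - 1).toNat).map
        (fun (k : Nat) => if min a b ≤ (k : Int) ∧ (k : Int) < max a b then (1 : Int) else 0)).sum
      = |b - a| := by
  rw [range_ind_sum _ _ _ (by omega) (by omega)]
  have hc : (((((L : Int) - 1).toNat) : Nat) : Int) = (L : Int) - 1 := by omega
  rw [hc]
  rcases le_total a b with h | h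
  · rw [abs_of_nonneg (by omega)]; omega
  · rw [abs_of_nonpos (by omega)]; omega

-- difference of two point indicators, summed over a range prefix
theorem range_point_diff_sum (m : Nat) (a b : Int) (h0 : 0 ≤ a) (hab : a ≤ b) :
    ((List.range m).map
        (fun (j : Nat) => (if a = (j : Int) then (1 : Int) else 0) - (if b = (j : Int) then 1 else 0))).sum
      = (if a < (m : Int) then (1 : Int) else 0) - (if b < (m : Int) then 1 else 0) := by
  induction m with
  | zero => simp; split_ifs <;> omega
  | succ m ih =>
    rw [List.range_succ, List.map_append, List.sum_append, ih]
    simp only [List.map_cons, List.map_nil, List.sum_cons, List.sum_nil]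
    push_cast
    split_ifs <;> omega

-- position of a keyboard char is a valid index
theorem pos_bounds (ns : List Char) (c : Char) (hc : c ∈ ns) :
    0 ≤ ((((PySem.List.index? ns c).getD 0 : Nat)) : Int) ∧
      ((((PySem.List.index? ns c).getD 0 : Nat)) : Int) ≤ (ns.length : Int) - 1 := by
  obtain ⟨k, hk⟩ := Option.isSome_iff_exists.mp ((PySem.List.index?_isSome_iff ns c).mpr hc)
  obtain ⟨hlt, -, -⟩ := PySem.List.getElem_of_index?_eq_some hk
  rw [hk]
  simp only [Option.getD_some]
  omega

-- pair components of ps.zip (ps.drop 1) are elements of ps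
theorem pair_mem {p : Int × Int} {ps : List Int} (hp : p ∈ ps.zip (ps.drop 1)) :
    p.1 ∈ ps ∧ p.2 ∈ ps := by
  obtain ⟨x, y⟩ := p
  have h := List.of_mem_zip hp
  exact ⟨h.1, List.mem_of_mem_drop h.2⟩

-- element update/read on Int indices (both indices nonnegative, update in range)
theorem getD_setD_int (d : List Int) (i j v : Int) (h0i : 0 ≤ i) (hi : i < (d.length : Int))
    (h0j : 0 ≤ j) :
    PySem.List.pyGetD (PySem.List.pySetD d i v) j 0
      = if j = i then v else PySem.List.pyGetD d j 0 := by
  rw [PySem.List.pySetD_of_nonneg d v h0i, PySem.List.pyGetD_of_nonneg _ 0 h0j,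
      PySem.List.pyGetD_of_nonneg d 0 h0j]
  rcases eq_or_ne j i with rfl | hne
  · have hlt : j.toNat < d.length := by omega
    simp [List.getD_eq_getElem?_getD, hlt]
  · have hne' : j.toNat ≠ i.toNat := by omega
    simp [List.getD_eq_getElem?_getD, Ne.symm hne', hne]

-- the per-index contribution of a pair list to the difference array
def dContrib (l : List (Int × Int)) (j : Int) : Int :=
  (l.map (fun p => (if min p.1 p.2 = j then (1 : Int) else 0)
                    - (if max p.1 p.2 = j then 1 else 0))).sum

-- invariant of B's difference-array building loop
theorem delta_spec (L : Nat) (l : List (Int × Int)) (d : List Int)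
    (hl : ∀ p ∈ l, (0 ≤ p.1 ∧ p.1 ≤ (L : Int) - 1) ∧ (0 ≤ p.2 ∧ p.2 ≤ (L : Int) - 1))
    (hd : d.length = L + 1) :
    (l.foldl
        (fun d p =>
          let d1 := PySem.List.pySetD d (min p.1 p.2) (PySem.List.pyGetD d (min p.1 p.2) 0 + 1)
          PySem.List.pySetD d1 (max p.1 p.2) (PySem.List.pyGetD d1 (max p.1 p.2) 0 - 1)) d).length
        = L + 1 ∧
    ∀ j : Int, 0 ≤ j →
      PySem.List.pyGetD
        (l.foldl
          (fun d p =>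
            let d1 := PySem.List.pySetD d (min p.1 p.2) (PySem.List.pyGetD d (min p.1 p.2) 0 + 1)
            PySem.List.pySetD d1 (max p.1 p.2) (PySem.List.pyGetD d1 (max p.1 p.2) 0 - 1)) d) j 0
        = PySem.List.pyGetD d j 0 + dContrib l j := by
  induction l generalizing d with
  | nil => exact ⟨hd, by intro j _; simp [dContrib]⟩
  | cons p l ih =>
    obtain ⟨⟨h11, h12⟩, h21, h22⟩ := hl p (by simp)
    set lo := min p.1 p.2 with hlo
    set hi := max p.1 p.2 with hhi
    have hlo0 : 0 ≤ lo := le_min h11 h21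
    have hhi0 : 0 ≤ hi := le_trans h11 (le_max_left _ _)
    have hloL : lo < (d.length : Int) := by
      have : lo ≤ (L : Int) - 1 := min_le_of_left_le h12
      omega
    have hhiL : hi < (d.length : Int) := by
      have : hi ≤ (L : Int) - 1 := max_le h12 h22
      omega
    set d1 := PySem.List.pySetD d lo (PySem.List.pyGetD d lo 0 + 1) with hd1
    set d2 := PySem.List.pySetD d1 hi (PySem.List.pyGetD d1 hi 0 - 1) with hd2
    have hlen1 : d1.length = d.length := PySem.List.length_pySetD _ _ _
    have hlen2 : d2.length = L + 1 := by
      rw [hd2, PySem.List.length_pySetD, hlen1, hd]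
    have hstep : ∀ j : Int, 0 ≤ j →
        PySem.List.pyGetD d2 j 0
          = PySem.List.pyGetD d j 0 + ((if lo = j then (1 : Int) else 0) - (if hi = j then 1 else 0)) := by
      intro j hj
      rw [hd2, getD_setD_int d1 hi j _ hhi0 (by omega) hj,
          hd1, getD_setD_int d lo j _ hlo0 hloL hj,
          getD_setD_int d lo hi _ hlo0 hloL hhi0]
      by_cases h2 : j = hi
      · by_cases h1 : j = lo
        · rw [if_pos h2, if_pos (h2.symm.trans h1), if_pos h1.symm, if_pos h2.symm, h1]; ring
        · have hnl : ¬ hi = lo := fun h => h1 (h2.trans h)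
          rw [if_pos h2, if_neg hnl, if_neg (fun h => h1 h.symm), if_pos h2.symm, h2]; ring
      · by_cases h1 : j = lo
        · rw [if_neg h2, if_pos h1, if_pos h1.symm, if_neg (fun h => h2 h.symm), h1]; ring
        · rw [if_neg h2, if_neg h1, if_neg (fun h => h1 h.symm), if_neg (fun h => h2 h.symm)]; ring
    obtain ⟨ihlen, ihget⟩ := ih d2 (fun q hq => hl q (by simp [hq])) hlen2
    refine ⟨by simpa using ihlen, ?_⟩
    intro j hj
    have := ihget j hj
    simp only [List.foldl_cons]
    rw [show (PySem.List.pySetD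
          (PySem.List.pySetD d (min p.1 p.2) (PySem.List.pyGetD d (min p.1 p.2) 0 + 1))
          (max p.1 p.2)
          (PySem.List.pyGetD
            (PySem.List.pySetD d (min p.1 p.2) (PySem.List.pyGetD d (min p.1 p.2) 0 + 1))
            (max p.1 p.2) 0 - 1)) = d2 from rfl]
    rw [this, hstep j hj]
    simp [dContrib]
    ring

-- the fresh difference array reads 0 everywhere
theorem getD_replicate_zero (m : Nat) (j : Int) (hj : 0 ≤ j) :
    PySem.List.pyGetD (List.replicate m (0 : Int)) j 0 = 0 := by
  rw [PySem.List.pyGetD_of_nonneg _ 0 hj]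
  rcases lt_or_ge j.toNat m with h | h
  · simp [List.getD_eq_getElem?_getD, h]
  · simp [List.getD_eq_getElem?_getD, Nat.not_lt.mpr h]

-- B's prefix-sum sweep over the gaps
theorem prefix_loop (m : Nat) (g : Int → Int) (t c : Int) :
    (PySem.List.pyRange 0 ((m : Nat) : Int) 1).foldl
        (fun (tc : Int × Int) k =>
          let cover := tc.2 + g k
          (tc.1 + cover, cover)) (t, c)
      = (t + ((List.range m).map
            (fun (k : Nat) => c + ((List.range (k + 1)).map (fun (j : Nat) => g (j : Int))).sum)).sum,
         c + ((List.range m).map (fun (j : Nat) => g (j : Int))).sum) := by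
  induction m generalizing t c with
  | zero => simp [PySem.List.pyRange]
  | succ m ih =>
    have hcast : (((m + 1 : Nat)) : Int) = ((m : Nat) : Int) + 1 := by push_cast; ring
    rw [hcast, PySem.List.pyRange_one_succ_right (by positivity), List.foldl_append, ih]
    simp only [List.foldl_cons, List.foldl_nil, List.range_succ, List.map_append, List.sum_append,
      List.map_cons, List.map_nil, List.sum_cons, List.sum_nil]
    simp only [Prod.mk.injEq]
    constructor <;> ring

-- B's whole else-branch computes the pairwise |difference| sum, given every char of
-- the string occurs on the keyboard
theorem alt_eq_pairsum (n : String) (cs : List Char)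
    (hall : ∀ c ∈ cs, c ∈ n.toList) :
    (let ps : List Int := cs.map (fun c => (((PySem.List.index? n.toList c).getD 0 : Nat) : Int))
     let delta : List Int :=
      (ps.zip (ps.drop 1)).foldl
        (fun d p =>
          let d1 := PySem.List.pySetD d (min p.1 p.2) (PySem.List.pyGetD d (min p.1 p.2) 0 + 1)
          PySem.List.pySetD d1 (max p.1 p.2) (PySem.List.pyGetD d1 (max p.1 p.2) 0 - 1))
        (PySem.List.pyRepeat [0] ((n.toList.length : Int) + 1))
     ((PySem.List.pyRange 0 ((n.toList.length : Int) - 1) 1).foldl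
        (fun (tc : Int × Int) k =>
          let cover := tc.2 + PySem.List.pyGetD delta k 0
          (tc.1 + cover, cover))
        ((0 : Int), (0 : Int))).1)
    = (((cs.map (fun c => (((PySem.List.index? n.toList c).getD 0 : Nat) : Int))).zip
          ((cs.map (fun c => (((PySem.List.index? n.toList c).getD 0 : Nat) : Int))).drop 1)).map
          (fun p => |p.2 - p.1|)).sum := by
  set L : Nat := n.toList.length with hL
  set f : Char → Int := fun c => (((PySem.List.index? n.toList c).getD 0 : Nat) : Int) with hf
  set ps : List Int := cs.map f with hps
  set pairs : List (Int × Int) := ps.zip (ps.drop 1) with hpairs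
  have hbnd : ∀ p ∈ pairs, (0 ≤ p.1 ∧ p.1 ≤ (L : Int) - 1) ∧ (0 ≤ p.2 ∧ p.2 ≤ (L : Int) - 1) := by
    intro p hp
    have hm := pair_mem hp
    have hget : ∀ x ∈ ps, 0 ≤ x ∧ x ≤ (L : Int) - 1 := by
      intro x hx
      rw [hps] at hx
      obtain ⟨c, hc, rfl⟩ := List.mem_map.mp hx
      exact pos_bounds n.toList c (hall c hc)
    exact ⟨hget _ hm.1, hget _ hm.2⟩
  -- the built array reads dContrib at every nonnegative index
  have hrep : PySem.List.pyRepeat [(0 : Int)] ((L : Int) + 1) = List.replicate (L + 1) 0 := by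
    rw [PySem.List.pyRepeat_singleton, show (((L : Int) + 1)).toNat = L + 1 by omega]
  have hdelta : ∀ j : Int, 0 ≤ j →
      PySem.List.pyGetD
        (pairs.foldl
          (fun d p =>
            let d1 := PySem.List.pySetD d (min p.1 p.2) (PySem.List.pyGetD d (min p.1 p.2) 0 + 1)
            PySem.List.pySetD d1 (max p.1 p.2) (PySem.List.pyGetD d1 (max p.1 p.2) 0 - 1))
          (PySem.List.pyRepeat [0] ((L : Int) + 1))) j 0
        = dContrib pairs j := by
    intro j hj
    rw [hrep]
    obtain ⟨-, hget⟩ := delta_spec L pairs (List.replicate (L + 1) 0) hbnd (by simp)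
    rw [hget j hj, getD_replicate_zero _ j hj, zero_add]
  -- run the sweep
  set M : Nat := ((L : Int) - 1).toNat with hM
  have hre : PySem.List.pyRange 0 ((L : Int) - 1) 1 = PySem.List.pyRange 0 ((M : Nat) : Int) 1 := by
    rw [PySem.List.pyRange_zero, PySem.List.pyRange_zero]
    simp [hM]
  simp only []
  rw [hre, prefix_loop M _ 0 0]
  simp only [zero_add]
  -- identify each prefix sum with the crossing count of its gap
  have hS : ∀ k : Nat, k < M →
      ((List.range (k + 1)).map (fun (j : Nat) =>
          PySem.List.pyGetD
            (pairs.foldl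
              (fun d p =>
                let d1 := PySem.List.pySetD d (min p.1 p.2) (PySem.List.pyGetD d (min p.1 p.2) 0 + 1)
                PySem.List.pySetD d1 (max p.1 p.2) (PySem.List.pyGetD d1 (max p.1 p.2) 0 - 1))
              (PySem.List.pyRepeat [0] ((L : Int) + 1))) (j : Int) 0)).sum
        = (pairs.map (fun p => if min p.1 p.2 ≤ (k : Int) ∧ (k : Int) < max p.1 p.2 then (1 : Int) else 0)).sum := by
    intro k hk
    have h1 : ∀ (j : Nat), j ∈ List.range (k + 1) →
        PySem.List.pyGetD
            (pairs.foldl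
              (fun d p =>
                let d1 := PySem.List.pySetD d (min p.1 p.2) (PySem.List.pyGetD d (min p.1 p.2) 0 + 1)
                PySem.List.pySetD d1 (max p.1 p.2) (PySem.List.pyGetD d1 (max p.1 p.2) 0 - 1))
              (PySem.List.pyRepeat [0] ((L : Int) + 1))) (j : Int) 0
          = dContrib pairs (j : Int) := fun j _ => hdelta (j : Int) (by positivity)
    rw [List.map_congr_left h1]
    unfold dContrib
    rw [sum_sum_comm (List.range (k + 1)) pairs
        (fun (j : Nat) p => (if min p.1 p.2 = (j : Int) then (1 : Int) else 0)
                            - (if max p.1 p.2 = (j : Int) then 1 else 0))]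
    refine congrArg List.sum (List.map_congr_left ?_)
    intro p hp
    obtain ⟨⟨h1a, h1b⟩, h2a, h2b⟩ := hbnd p hp
    rw [range_point_diff_sum (k + 1) (min p.1 p.2) (max p.1 p.2)
        (le_min h1a h2a) (min_le_max)]
    have hkM : ((k : Int)) < (L : Int) - 1 := by omega
    push_cast
    split_ifs <;> omega
  rw [List.map_congr_left (fun k hk => hS k (List.mem_range.mp hk))]
  -- swap the double sum and count the gaps each pair crosses
  rw [sum_sum_comm (List.range M) pairs
      (fun (k : Nat) p => if min p.1 p.2 ≤ (k : Int) ∧ (k : Int) < max p.1 p.2 then (1 : Int) else 0)]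
  refine congrArg List.sum (List.map_congr_left ?_)
  intro p hp
  obtain ⟨⟨h1a, h1b⟩, h2a, h2b⟩ := hbnd p hp
  have := gap_count_eq_abs L p.1 p.2 h1a h1b h2a h2b
  rw [hM]
  exact this

theorem linear_keybord_spec : Claim_equal_linear_keybord := by
  intro n string _ hpre
  unfold Spec_linear_keybord linear_keybord linear_keybord_alt
  cases hcs : string.toList with
  | nil => simp
  | cons c0 tl =>
    cases tl with
    | nil => simp
    | cons c1 tl =>
      rw [if_neg (by simp), if_neg (by simp)]
      have hall : ∀ c ∈ (c0 :: c1 :: tl), c ∈ n.toList := by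
        rcases hpre with h | h
        · rw [hcs] at h; simp at h
        · rw [hcs] at h
          intro c hc
          exact List.mem_of_elem_eq_true (List.all_eq_true.mp h c hc)
      rw [else_branch n c0 (c1 :: tl), ← alt_eq_pairsum n (c0 :: c1 :: tl) hall]
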